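-- pv_equiv track=rewrite | github.com/kamrul-pu/problem-solving | data_structure_and_algorithms/dynamic_programming/7_ninja_technique.py | max_merit_optimal
-- ===== SOURCE A (Python) =====
-- def max_merit_optimal(task: list[list[int]], n: int) -> int:
--     prev: list[int] = [0] * 4
--     prev[0] = max(task[0][1], task[0][2])
--     prev[1] = max(task[0][0], task[0][2])
--     prev[2] = max(task[0][0], task[0][1])
--     prev[3] = max(task[0][0], task[0][1], task[0][2])
--
--     for day in range(1, n):
--         temp: list[int] = [0] * 4
--         for last in range(4):
--             temp[last] = 0
--             for t in range(3):
--                 if t != last: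
--                     temp[last] = max(temp[last], task[day][t] + prev[t])
--         prev = temp
--
--     return prev[3]
-- ===== SOURCE B (Python) =====
-- def max_merit_optimal(task: list[list[int]], n: int) -> int:
--     # Top-down DP: solve(day, last) = best merit for days 0..day when the
--     # following day's task is `last` (3 = no restriction), memoized on (day, last).
--     memo: dict[tuple[int, int], int] = {}
--
--     def solve(day: int, last: int) -> int:
--         if day <= 0:
--             return max(task[0][t] for t in range(3) if t != last)
--         if (day, last) not in memo:
--             best = 0
--             for t in range(3):
--                 if t != last:
--                     best = max(best, task[day][t] + solve(day - 1, t))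
--             memo[(day, last)] = best
--         return memo[(day, last)]
--
--     return solve(n - 1, 3)
-- ===== Notes on version B (the rewrite author's own statement) =====
-- stated objective: alternative
-- what changed: Replaces the bottom-up iteration that rebuilds a 4-slot prev/temp table day by day with top-down memoized recursion solve(day, last) over (day, last) states, started from the final day.
import Mathlib
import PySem

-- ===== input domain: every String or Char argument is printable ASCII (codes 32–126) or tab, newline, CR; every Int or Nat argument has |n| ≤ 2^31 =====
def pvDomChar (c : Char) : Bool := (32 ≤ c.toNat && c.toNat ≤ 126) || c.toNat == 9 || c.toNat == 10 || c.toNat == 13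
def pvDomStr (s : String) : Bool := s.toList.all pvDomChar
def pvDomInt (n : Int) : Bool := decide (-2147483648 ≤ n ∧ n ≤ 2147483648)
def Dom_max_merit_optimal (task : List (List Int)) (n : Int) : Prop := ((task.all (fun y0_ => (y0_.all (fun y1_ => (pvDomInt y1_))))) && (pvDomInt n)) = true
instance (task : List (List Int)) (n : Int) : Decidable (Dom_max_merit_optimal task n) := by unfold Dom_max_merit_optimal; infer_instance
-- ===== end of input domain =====

-- B replaces A's bottom-up prev/temp table iteration by top-down memoized
-- recursion on (day, last); same values on every input on which A returns.

-- xs[i] / task[i] on an index that is in range under Pre_ (default never reached there)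
def pvIdx (l : List Int) (i : Int) : Int := PySem.List.pyGetD l i 0
def pvRow (t : List (List Int)) (i : Int) : List Int := PySem.List.pyGetD t i []

-- ===== PORT A =====
-- one day of A's nested loops: temp[last] = max over t ≠ last of row[t] + prev[t] (temp starts at 0)
def aStep (row prev : List Int) : List Int :=
  (PySem.List.pyRange 0 4 1).foldl
    (fun temp last =>
      PySem.List.pySetD temp last
        ((PySem.List.pyRange 0 3 1).foldl
          (fun acc t => if t ≠ last then max acc (pvIdx row t + pvIdx prev t) else acc) 0))
    (List.replicate 4 0)

def max_merit_optimal (task : List (List Int)) (n : Int) : Int :=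
  let r0 := pvRow task 0
  let prev0 : List Int :=
    ((((List.replicate 4 (0:Int)).set 0 (max (pvIdx r0 1) (pvIdx r0 2))).set 1
        (max (pvIdx r0 0) (pvIdx r0 2))).set 2 (max (pvIdx r0 0) (pvIdx r0 1))).set 3
      (max (max (pvIdx r0 0) (pvIdx r0 1)) (pvIdx r0 2))
  let prev := (PySem.List.pyRange 1 n 1).foldl (fun prev day => aStep (pvRow task day) prev) prev0
  pvIdx prev 3

-- ===== PORT B =====
-- base case: max(task[0][t] for t in range(3) if t != last); the list is never empty, default unreached
def bBase (task : List (List Int)) (last : Int) : Int :=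
  (PySem.List.max? (((PySem.List.pyRange 0 3 1).filter (fun t => t ≠ last)).map
      (fun t => pvIdx (pvRow task 0) t)) (fun x => x)).getD 0

-- solve(day, last) threading the memo dict; bLoop is the `for t in range(3)` body
-- (it carries 0 < day from solve's branch so the recursion on day is well founded)
mutual
def bSolve (task : List (List Int)) (day last : Int) (memo : PySem.Dict (Int × Int) Int) :
    Int × PySem.Dict (Int × Int) Int :=
  if h : day ≤ 0 then (bBase task last, memo)
  else
    match PySem.Dict.get? memo (day, last) with
    | some v => (v, memo)
    | none =>
      let r := bLoop task day last (by omega) 0 0 memo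
      (r.1, PySem.Dict.insert r.2 (day, last) r.1)
termination_by (day.toNat, 1, 0)

def bLoop (task : List (List Int)) (day last : Int) (hday : 0 < day) (t : Nat) (best : Int)
    (memo : PySem.Dict (Int × Int) Int) : Int × PySem.Dict (Int × Int) Int :=
  if t < 3 then
    if (t : Int) ≠ last then
      let r := bSolve task (day - 1) (t : Int) memo
      bLoop task day last hday (t + 1) (max best (pvIdx (pvRow task day) t + r.1)) r.2
    else bLoop task day last hday (t + 1) best memo
  else (best, memo)
termination_by (day.toNat, 0, 3 - t)
end

def max_merit_optimal_alt (task : List (List Int)) (n : Int) : Int :=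
  (bSolve task (n - 1) 3 PySem.Dict.empty).1

-- ===== PRECONDITION & SPEC =====
-- exactly the inputs both Pythons return on: rows 0 .. max(n,1)-1 exist and each has ≥ 3 entries
def Pre_max_merit_optimal (task : List (List Int)) (n : Int) : Prop :=
  (max n 1).toNat ≤ task.length ∧ ∀ row ∈ task.take (max n 1).toNat, 3 ≤ row.length
instance (task : List (List Int)) (n : Int) : Decidable (Pre_max_merit_optimal task n) := by
  unfold Pre_max_merit_optimal; infer_instance
def pvWitness_max_merit_optimal : List (List Int) × Int := ([[1, 2, 3], [4, 5, 6]], 2)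

def Spec_max_merit_optimal (task : List (List Int)) (n : Int) (out : Int) : Prop := out = max_merit_optimal_alt task n
instance (task : List (List Int)) (n : Int) (out : Int) : Decidable (Spec_max_merit_optimal task n out) := by unfold Spec_max_merit_optimal; infer_instance

-- ===== CLAIM (what is proved, stated in full; the proofs are below) =====
def Claim_equal_max_merit_optimal : Prop := ∀ (task : List (List Int)) (n : Int), Dom_max_merit_optimal task n → Pre_max_merit_optimal task n → Spec_max_merit_optimal task n (max_merit_optimal task n)

-- ===== LEMMAS AND PROOFS =====

-- the common reference recurrence: the 4-tuple of A's prev after processing days 1..k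
def qStep (row : List Int) (p : Int × Int × Int × Int) : Int × Int × Int × Int :=
  let c0 := pvIdx row 0 + p.1
  let c1 := pvIdx row 1 + p.2.1
  let c2 := pvIdx row 2 + p.2.2.1
  (max (max 0 c1) c2, max (max 0 c0) c2, max (max 0 c0) c1, max (max (max 0 c0) c1) c2)

def qInit (task : List (List Int)) : Int × Int × Int × Int :=
  (max (pvIdx (pvRow task 0) 1) (pvIdx (pvRow task 0) 2),
   max (pvIdx (pvRow task 0) 0) (pvIdx (pvRow task 0) 2),
   max (pvIdx (pvRow task 0) 0) (pvIdx (pvRow task 0) 1),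
   max (max (pvIdx (pvRow task 0) 0) (pvIdx (pvRow task 0) 1)) (pvIdx (pvRow task 0) 2))

def G (task : List (List Int)) : Nat → Int × Int × Int × Int
  | 0 => qInit task
  | k + 1 => qStep (pvRow task ((k : Int) + 1)) (G task k)

def listOf (q : Int × Int × Int × Int) : List Int := [q.1, q.2.1, q.2.2.1, q.2.2.2]

-- spec value of bSolve (what the memo stores / the call returns)
def selG (task : List (List Int)) (day last : Int) : Int :=
  if day ≤ 0 then bBase task last
  else if last = 0 then (G task day.toNat).1
  else if last = 1 then (G task day.toNat).2.1
  else if last = 2 then (G task day.toNat).2.2.1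
  else (G task day.toNat).2.2.2

def MemOK (task : List (List Int)) (memo : PySem.Dict (Int × Int) Int) : Prop :=
  ∀ p v, PySem.Dict.get? memo p = some v → v = selG task p.1 p.2

lemma aStep_eval (row : List Int) (q : Int × Int × Int × Int) :
    aStep row (listOf q) = listOf (qStep row q) := by
  obtain ⟨p0, p1, p2, a⟩ := q
  have h4 : PySem.List.pyRange 0 4 1 = [0, 1, 2, 3] := by decide
  have h3 : PySem.List.pyRange 0 3 1 = [0, 1, 2] := by decide
  simp [aStep, qStep, listOf, h4, h3, List.foldl, pvIdx, PySem.List.pySetD, PySem.List.pySet?,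
    PySem.List.pyGetD, PySem.List.pyGet?, PySem.List.pyIdx?]

lemma A_fold (task : List (List Int)) (k : Nat) :
    (PySem.List.pyRange 1 (1 + (k : Int)) 1).foldl
      (fun prev day => aStep (pvRow task day) prev) (listOf (qInit task)) = listOf (G task k) := by
  induction k with
  | zero =>
    rw [PySem.List.pyRange_one_eq_nil (by omega)]
    rfl
  | succ k ih =>
    have hstep : (1 + ((k + 1 : Nat) : Int)) = (1 + (k : Int)) + 1 := by push_cast; ring
    rw [hstep, PySem.List.pyRange_one_succ_right (by omega), List.foldl_append, ih]
    simp only [List.foldl_cons, List.foldl_nil, aStep_eval]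
    have : (1 : Int) + (k : Int) = (k : Int) + 1 := by ring
    rw [this]; rfl

lemma A_eq (task : List (List Int)) (n : Int) :
    max_merit_optimal task n = (G task ((max n 1 - 1).toNat)).2.2.2 := by
  have hrange : PySem.List.pyRange 1 n 1
      = PySem.List.pyRange 1 (1 + (((max n 1 - 1).toNat : Nat) : Int)) 1 := by
    rcases le_or_gt n 1 with h | h
    · rw [PySem.List.pyRange_one_eq_nil (by omega), PySem.List.pyRange_one_eq_nil (by omega)]
    · congr 1; omega
  have hinit : ((((List.replicate 4 (0:Int)).set 0 (max (pvIdx (pvRow task 0) 1) (pvIdx (pvRow task 0) 2))).set 1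
        (max (pvIdx (pvRow task 0) 0) (pvIdx (pvRow task 0) 2))).set 2
        (max (pvIdx (pvRow task 0) 0) (pvIdx (pvRow task 0) 1))).set 3
      (max (max (pvIdx (pvRow task 0) 0) (pvIdx (pvRow task 0) 1)) (pvIdx (pvRow task 0) 2))
      = listOf (qInit task) := rfl
  show pvIdx ((PySem.List.pyRange 1 n 1).foldl (fun prev day => aStep (pvRow task day) prev) _) 3
      = _
  rw [hinit, hrange, A_fold]
  simp [listOf, pvIdx, PySem.List.pyGetD, PySem.List.pyGet?, PySem.List.pyIdx?]

-- unfolding G at a positive Int day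
lemma G_succ_int (task : List (List Int)) (day : Int) (h : 0 < day) :
    G task day.toNat = qStep (pvRow task day) (G task (day - 1).toNat) := by
  have hm : day.toNat = (day - 1).toNat + 1 := by omega
  rw [hm]
  show qStep (pvRow task (((day - 1).toNat : Nat) + 1 : Int)) _ = _
  congr 2
  omega

lemma bBase_eval (task : List (List Int)) :
    bBase task 0 = max (pvIdx (pvRow task 0) 1) (pvIdx (pvRow task 0) 2) ∧
    bBase task 1 = max (pvIdx (pvRow task 0) 0) (pvIdx (pvRow task 0) 2) ∧
    bBase task 2 = max (pvIdx (pvRow task 0) 0) (pvIdx (pvRow task 0) 1) ∧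
    bBase task 3 = max (max (pvIdx (pvRow task 0) 0) (pvIdx (pvRow task 0) 1)) (pvIdx (pvRow task 0) 2) := by
  have f0 : (PySem.List.pyRange 0 3 1).filter (fun t => t ≠ (0:Int)) = [1, 2] := by decide
  have f1 : (PySem.List.pyRange 0 3 1).filter (fun t => t ≠ (1:Int)) = [0, 2] := by decide
  have f2 : (PySem.List.pyRange 0 3 1).filter (fun t => t ≠ (2:Int)) = [0, 1] := by decide
  have f3 : (PySem.List.pyRange 0 3 1).filter (fun t => t ≠ (3:Int)) = [0, 1, 2] := by decide
  refine ⟨?_, ?_, ?_, ?_⟩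
  · rw [bBase, f0, List.map_cons, List.map_cons, List.map_nil, PySem.List.max?_id_cons]
    simp [List.foldl]
  · rw [bBase, f1, List.map_cons, List.map_cons, List.map_nil, PySem.List.max?_id_cons]
    simp [List.foldl]
  · rw [bBase, f2, List.map_cons, List.map_cons, List.map_nil, PySem.List.max?_id_cons]
    simp [List.foldl]
  · rw [bBase, f3, List.map_cons, List.map_cons, List.map_cons, List.map_nil,
      PySem.List.max?_id_cons]
    simp [List.foldl]

lemma bBase_sel (task : List (List Int)) :
    bBase task 0 = (G task 0).1 ∧ bBase task 1 = (G task 0).2.1 ∧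
    bBase task 2 = (G task 0).2.2.1 := by
  obtain ⟨h0, h1, h2, _⟩ := bBase_eval task
  exact ⟨h0, h1, h2⟩

-- selG at a nonnegative day picks the matching component of G (for last ∈ {0,1,2})
lemma selG_comp (task : List (List Int)) (day : Int) (h : 0 ≤ day) :
    selG task day 0 = (G task day.toNat).1 ∧ selG task day 1 = (G task day.toNat).2.1 ∧
    selG task day 2 = (G task day.toNat).2.2.1 := by
  obtain ⟨h0, h1, h2⟩ := bBase_sel task
  rcases le_or_gt day 0 with hle | hgt
  · have hd : day = 0 := le_antisymm hle h
    subst hd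
    simp [selG, h0, h1, h2]
  · simp [selG, not_le.mpr hgt]

lemma memOK_empty (task : List (List Int)) : MemOK task PySem.Dict.empty := by
  intro p v hv
  simp [PySem.Dict.get?_empty] at hv

-- memoization soundness: with a correct memo, bSolve returns the spec value and keeps the memo correct
lemma bSolve_ok (task : List (List Int)) :
    ∀ (d : Nat) (day : Int), day.toNat ≤ d → ∀ (last : Int) (memo : PySem.Dict (Int × Int) Int),
      MemOK task memo →
      (bSolve task day last memo).1 = selG task day last ∧ MemOK task (bSolve task day last memo).2 := by
  intro d
  induction d with
  | zero =>
    intro day hday last memo hm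
    have h0 : day ≤ 0 := by omega
    rw [bSolve]
    simp only [h0, dif_pos]
    exact ⟨by simp [selG, h0], hm⟩
  | succ d ih =>
    intro day hday last memo hm
    by_cases h0 : day ≤ 0
    · rw [bSolve]
      simp only [h0, dif_pos]
      exact ⟨by simp [selG, h0], hm⟩
    · have hpos : 0 < day := by omega
      have hsub : (day - 1).toNat ≤ d := by omega
      -- the three sequential recursive calls of the loop
      have IH : ∀ (l : Int) (m : PySem.Dict (Int × Int) Int), MemOK task m →
          (bSolve task (day - 1) l m).1 = selG task (day - 1) l ∧
          MemOK task (bSolve task (day - 1) l m).2 := fun l m hm' => ih (day - 1) hsub l m hm'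
      obtain ⟨s0, s1, s2⟩ := selG_comp task (day - 1) (by omega)
      -- evaluate the loop for each shape of `last`
      have hloop : ∀ (m : PySem.Dict (Int × Int) Int), MemOK task m →
          (bLoop task day last hpos 0 0 m).1 = selG task day last ∧
          MemOK task (bLoop task day last hpos 0 0 m).2 := by
        intro m hm'
        have hG := G_succ_int task day hpos
        by_cases e0 : last = 0
        · subst e0
          rw [bLoop, if_pos (by omega), if_neg (by decide)]
          obtain ⟨v1, m1⟩ := IH 1 m hm'
          rw [bLoop, if_pos (by omega), if_pos (by decide)]
          push_cast
          rw [v1]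
          obtain ⟨v2, m2⟩ := IH 2 _ m1
          rw [bLoop, if_pos (by omega), if_pos (by decide)]
          push_cast
          rw [v2]
          rw [bLoop, if_neg (by omega)]
          refine ⟨?_, m2⟩
          rw [s1, s2]
          simp only [selG, if_neg (not_le.mpr hpos), hG]
          rfl
        · by_cases e1 : last = 1
          · subst e1
            obtain ⟨v0, m0⟩ := IH 0 m hm'
            rw [bLoop, if_pos (by omega), if_pos (by decide)]
            push_cast
            rw [v0]
            obtain ⟨v1, m1⟩ := IH 1 _ m0
            rw [bLoop, if_pos (by omega), if_neg (by decide)]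
            obtain ⟨v2, m2⟩ := IH 2 _ m0
            rw [bLoop, if_pos (by omega), if_pos (by decide)]
            push_cast
            rw [v2]
            rw [bLoop, if_neg (by omega)]
            refine ⟨?_, m2⟩
            rw [s0, s2]
            simp only [selG, if_neg (not_le.mpr hpos), if_neg (by decide : ¬ ((1:Int) = 0)), hG]
            rfl
          · by_cases e2 : last = 2
            · subst e2
              obtain ⟨v0, m0⟩ := IH 0 m hm'
              rw [bLoop, if_pos (by omega), if_pos (by decide)]
              push_cast
              rw [v0]
              obtain ⟨v1, m1⟩ := IH 1 _ m0
              rw [bLoop, if_pos (by omega), if_pos (by decide)]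
              push_cast
              rw [v1]
              rw [bLoop, if_pos (by omega), if_neg (by decide)]
              rw [bLoop, if_neg (by omega)]
              refine ⟨?_, m1⟩
              rw [s0, s1]
              simp only [selG, if_neg (not_le.mpr hpos), if_neg (by decide : ¬ ((2:Int) = 0)),
                if_neg (by decide : ¬ ((2:Int) = 1)), hG]
              rfl
            · obtain ⟨v0, m0⟩ := IH 0 m hm'
              rw [bLoop, if_pos (by omega), if_pos (by intro hc; exact e0 (by omega))]
              push_cast
              rw [v0]
              obtain ⟨v1, m1⟩ := IH 1 _ m0
              rw [bLoop, if_pos (by omega), if_pos (by intro hc; exact e1 (by omega))]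
              push_cast
              rw [v1]
              obtain ⟨v2, m2⟩ := IH 2 _ m1
              rw [bLoop, if_pos (by omega), if_pos (by intro hc; exact e2 (by omega))]
              push_cast
              rw [v2]
              rw [bLoop, if_neg (by omega)]
              refine ⟨?_, m2⟩
              rw [s0, s1, s2]
              simp only [selG, if_neg (not_le.mpr hpos), if_neg e0, if_neg e1, if_neg e2, hG]
              rfl
      rw [bSolve]
      simp only [dif_neg h0]
      cases hget : PySem.Dict.get? memo (day, last) with
      | some v =>
        simp only []
        exact ⟨hm _ _ hget, hm⟩
      | none =>
        simp only []
        obtain ⟨hv, hmem⟩ := hloop memo hm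
        constructor
        · exact hv
        · intro p v hpv
          rw [PySem.Dict.get?_insert] at hpv
          split at hpv
          · next heq => cases hpv; subst heq; exact hv
          · exact hmem _ _ hpv

lemma B_eq (task : List (List Int)) (n : Int) :
    max_merit_optimal_alt task n = (G task ((max n 1 - 1).toNat)).2.2.2 := by
  have h := (bSolve_ok task (n - 1).toNat (n - 1) le_rfl 3 PySem.Dict.empty (memOK_empty task)).1
  show (bSolve task (n - 1) 3 PySem.Dict.empty).1 = _
  rw [h]
  rcases le_or_gt n 1 with hle | hgt
  · have h1 : n - 1 ≤ 0 := by omega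
    have hk : (max n 1 - 1).toNat = 0 := by omega
    rw [hk]
    simp only [selG, if_pos h1]
    rw [(bBase_eval task).2.2.2]
    rfl
  · have h1 : ¬ (n - 1 ≤ 0) := by omega
    have hk : (max n 1 - 1).toNat = (n - 1).toNat := by omega
    rw [hk]
    simp [selG, h1]

-- ===== VERDICT (by name: the statement is the Claim_ definition above) =====
theorem max_merit_optimal_spec : Claim_equal_max_merit_optimal := by
  intro task n _ _
  unfold Spec_max_merit_optimal
  rw [A_eq, B_eq]
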